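-- pv_equiv track=rewrite | github.com/Slangoij/PlayData_Algorithm_Study | 알고리즘 스터디 1차/23.모의고사.py | solution
-- ===== SOURCE A (Python) =====
-- def solution(answers):
--     answer = []
--
--     supo1 = [1, 2, 3, 4, 5]
--     supo2 = [2, 1, 2, 3, 2, 4, 2, 5]
--     supo3 = [3, 3, 1, 1, 2, 2, 4, 4, 5, 5]
--
--     solv1 = solv2 = solv3 = 0
--     prob_leng = len(answers)
--     supo_leng1 = len(supo1)
--     supo_leng2 = len(supo2)
--     supo_leng3 = len(supo3)
--     for i in range(0, prob_leng):
--         if answers[i % prob_leng] == supo1[i % supo_leng1]: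
--             solv1 += 1
--         if answers[i % prob_leng] == supo2[i % supo_leng2]:
--             solv2 += 1
--         if answers[i % prob_leng] == supo3[i % supo_leng3]:
--             solv3 += 1
--
--     max_right_person = max(solv1, solv2, solv3)
--     if solv1 == max_right_person:
--         answer.append(1)
--     if solv2 == max_right_person:
--         answer.append(2)
--     if solv3 == max_right_person:
--         answer.append(3)
--
--     if len(answer) > 1:
--         answer.sort()
--     return answer
-- ===== SOURCE B (Python) =====
-- def solution(answers):
--     # Bucket-count answers by (index mod 40, value); all three patterns have period
--     # dividing 40, so each pattern's score is a 40-entry table lookup sum.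
--     patterns = ([1, 2, 3, 4, 5], [2, 1, 2, 3, 2, 4, 2, 5], [3, 3, 1, 1, 2, 2, 4, 4, 5, 5])
--     cnt = {}
--     for i, a in enumerate(answers):
--         key = (i % 40, a)
--         cnt[key] = cnt.get(key, 0) + 1
--     scores = []
--     for p in patterns:
--         tiled = p * (40 // len(p))
--         scores.append(sum(cnt.get(key, 0) for key in enumerate(tiled)))
--     best = max(scores)
--     return [k + 1 for k in (0, 1, 2) if scores[k] == best]
-- ===== Notes on version B (the rewrite author's own statement) =====
-- stated objective: alternative
-- what changed: Instead of A's fused scan updating three counters with modular pattern indexing, B makes one bucketing pass that builds a dict counting answers by (index mod 40, value) -- 40 is a common period of the three patterns -- and then computes each pattern's score as a sum of 40 table lookups over the tiled pattern, so the scoring phase no longer touches the answers at all.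
import Mathlib
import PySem

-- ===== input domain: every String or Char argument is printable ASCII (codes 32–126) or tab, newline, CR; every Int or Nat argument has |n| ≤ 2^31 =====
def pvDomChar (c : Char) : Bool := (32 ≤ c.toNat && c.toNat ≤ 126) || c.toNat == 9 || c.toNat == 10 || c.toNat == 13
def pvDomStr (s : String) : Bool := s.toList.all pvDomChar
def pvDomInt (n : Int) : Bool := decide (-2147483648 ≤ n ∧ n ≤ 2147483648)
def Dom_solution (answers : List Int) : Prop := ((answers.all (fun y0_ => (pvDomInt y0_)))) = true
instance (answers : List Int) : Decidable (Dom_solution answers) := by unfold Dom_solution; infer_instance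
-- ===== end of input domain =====

-- B replaces A's fused three-counter scan by a different algorithm: one bucketing pass building a
-- counter keyed by (index mod 40, answer) — 40 is a common period of all three patterns — then each
-- pattern's score is a 40-entry table-lookup sum (objective: alternative).


-- ===== PORT A =====
-- Literal port of A. All indices are mod the list's own length so indexing is in range;
-- pyGetD _ _ 0 is exact there (the default is never reached).
def solution (answers : List Int) : List Int :=
  let supo1 : List Int := [1, 2, 3, 4, 5]
  let supo2 : List Int := [2, 1, 2, 3, 2, 4, 2, 5]
  let supo3 : List Int := [3, 3, 1, 1, 2, 2, 4, 4, 5, 5]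
  let probLeng : Int := (answers.length : Int)
  let s := (PySem.List.pyRange 0 probLeng 1).foldl
    (fun (s : Int × Int × Int) i =>
      (s.1 + (if PySem.List.pyGetD answers (PySem.Int.mod i probLeng) 0
                = PySem.List.pyGetD supo1 (PySem.Int.mod i 5) 0 then 1 else 0),
       s.2.1 + (if PySem.List.pyGetD answers (PySem.Int.mod i probLeng) 0
                = PySem.List.pyGetD supo2 (PySem.Int.mod i 8) 0 then 1 else 0),
       s.2.2 + (if PySem.List.pyGetD answers (PySem.Int.mod i probLeng) 0
                = PySem.List.pyGetD supo3 (PySem.Int.mod i 10) 0 then 1 else 0)))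
    ((0 : Int), (0 : Int), (0 : Int))
  let maxRight := max s.1 (max s.2.1 s.2.2)
  let answer := (if s.1 = maxRight then [(1 : Int)] else [])
             ++ (if s.2.1 = maxRight then [(2 : Int)] else [])
             ++ (if s.2.2 = maxRight then [(3 : Int)] else [])
  if answer.length > 1 then PySem.List.sorted answer (fun x => x) else answer

-- ===== PORT B =====
-- cnt[(i % 40, a)] += 1 bucketing pass (dict.get default 0), then per pattern
-- sum(cnt.get(key, 0) for key in enumerate(p * (40 // len(p)))).
def pvBucket (answers : List Int) : PySem.Dict (Int × Int) Int :=
  (PySem.List.enumerate answers).foldl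
    (fun d ia =>
      d.insert (PySem.Int.mod ia.1 40, ia.2) (d.getD (PySem.Int.mod ia.1 40, ia.2) 0 + 1))
    PySem.Dict.empty

def pvTableScore (cnt : PySem.Dict (Int × Int) Int) (p : List Int) : Int :=
  (PySem.List.enumerate (PySem.List.pyRepeat p (PySem.Int.floordiv 40 (p.length : Int)))).foldl
    (fun s key => s + cnt.getD key 0) 0

def solution_alt (answers : List Int) : List Int :=
  let patterns : List (List Int) :=
    [[1, 2, 3, 4, 5], [2, 1, 2, 3, 2, 4, 2, 5], [3, 3, 1, 1, 2, 2, 4, 4, 5, 5]]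
  let cnt := pvBucket answers
  let scores := patterns.foldl (fun acc p => acc ++ [pvTableScore cnt p]) []
  let best := (PySem.List.max? scores (fun x => x)).getD 0
  ([0, 1, 2] : List Int).foldl
    (fun acc k => if PySem.List.pyGetD scores k 0 = best then acc ++ [k + 1] else acc) []

-- ===== PRECONDITION & SPEC =====
def Spec_solution (answers : List Int) (out : List Int) : Prop := out = solution_alt answers
instance (answers : List Int) (out : List Int) : Decidable (Spec_solution answers out) := by unfold Spec_solution; infer_instance

-- ===== CLAIM (what is proved, stated in full; the proofs are below) =====
def Claim_equal_solution : Prop := ∀ (answers : List Int), Dom_solution answers → Spec_solution answers (solution answers)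

-- ===== LEMMAS AND PROOFS =====

-- the direct per-pattern score both ports are reduced to
def pvScore (answers : List Int) (p : List Int) : Int :=
  ((PySem.List.enumerate answers).countP
    (fun ia => decide (ia.2 = PySem.List.pyGetD p (PySem.Int.mod ia.1 (p.length : Int)) 0)) : Int)

-- membership in enumerate determines the element at the (offset) index
theorem pv_enum_getD (answers : List Int) :
    ∀ (s i a : Int), (i, a) ∈ PySem.List.enumerate answers s →
      s ≤ i ∧ PySem.List.pyGetD answers (i - s) 0 = a := by
  induction answers with
  | nil => intro s i a h; simp [PySem.List.enumerate] at h
  | cons x xs ih =>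
    intro s i a h
    rw [PySem.List.enumerate_cons] at h
    rcases List.mem_cons.mp h with h | h
    · rw [Prod.mk.injEq] at h
      obtain ⟨h1, h2⟩ := h
      subst h1; subst h2
      refine ⟨le_refl _, ?_⟩
      rw [sub_self, PySem.List.pyGetD_of_nonneg _ _ (le_refl 0)]
      rfl
    · obtain ⟨hle, hget⟩ := ih (s + 1) i a h
      refine ⟨by omega, ?_⟩
      rw [PySem.List.pyGetD_of_nonneg _ _ (by omega)] at hget ⊢
      have h1 : (i - s).toNat = (i - (s + 1)).toNat + 1 := by omega
      rw [h1]
      simpa using hget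

-- A's fused fold computes the triple of per-pattern scores
theorem pv_comp_gen (answers p : List Int) (L : Int) (hL : ((p.length : Nat) : Int) = L) :
    List.foldl (fun (t : Int) (ia : Int × Int) =>
        t + (if ia.2 = PySem.List.pyGetD p (PySem.Int.mod ia.1 L) 0 then 1 else 0)) 0
      (PySem.List.enumerate answers) = pvScore answers p := by
  subst hL
  rw [PySem.List.foldl_congr_mem _ _
    (fun (t : Int) (ia : Int × Int) =>
      if ia.2 = PySem.List.pyGetD p (PySem.Int.mod ia.1 ((p.length : Nat) : Int)) 0 then t + 1 else t)
    _ (by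
        intro acc x _
        by_cases h : x.2 = PySem.List.pyGetD p (PySem.Int.mod x.1 ((p.length : Nat) : Int)) 0 <;>
          simp [h])]
  rw [PySem.List.foldl_ite_add_one, zero_add]
  rfl

theorem pv_fold_eq (answers : List Int) :
    (PySem.List.pyRange 0 (answers.length : Int) 1).foldl
      (fun (s : Int × Int × Int) i =>
        (s.1 + (if PySem.List.pyGetD answers (PySem.Int.mod i (answers.length : Int)) 0
                  = PySem.List.pyGetD [(1:Int), 2, 3, 4, 5] (PySem.Int.mod i 5) 0 then 1 else 0),
         s.2.1 + (if PySem.List.pyGetD answers (PySem.Int.mod i (answers.length : Int)) 0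
                  = PySem.List.pyGetD [(2:Int), 1, 2, 3, 2, 4, 2, 5] (PySem.Int.mod i 8) 0 then 1 else 0),
         s.2.2 + (if PySem.List.pyGetD answers (PySem.Int.mod i (answers.length : Int)) 0
                  = PySem.List.pyGetD [(3:Int), 3, 1, 1, 2, 2, 4, 4, 5, 5] (PySem.Int.mod i 10) 0 then 1 else 0)))
      (0, 0, 0)
    = (pvScore answers [1, 2, 3, 4, 5],
       pvScore answers [2, 1, 2, 3, 2, 4, 2, 5],
       pvScore answers [3, 3, 1, 1, 2, 2, 4, 4, 5, 5]) := by
  have hmod : ∀ i ∈ PySem.List.pyRange 0 (answers.length : Int) 1,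
      PySem.Int.mod i (answers.length : Int) = i := by
    intro i hi
    obtain ⟨h0, h1⟩ := PySem.List.mem_pyRange_one.mp hi
    rw [PySem.Int.mod_eq_emod_of_pos (by omega)]
    exact Int.emod_eq_of_lt h0 h1
  rw [PySem.List.foldl_congr_mem _ _
    (fun (s : Int × Int × Int) i =>
        (s.1 + (if PySem.List.pyGetD answers i 0
                  = PySem.List.pyGetD [(1:Int), 2, 3, 4, 5] (PySem.Int.mod i 5) 0 then 1 else 0),
         s.2.1 + (if PySem.List.pyGetD answers i 0
                  = PySem.List.pyGetD [(2:Int), 1, 2, 3, 2, 4, 2, 5] (PySem.Int.mod i 8) 0 then 1 else 0),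
         s.2.2 + (if PySem.List.pyGetD answers i 0
                  = PySem.List.pyGetD [(3:Int), 3, 1, 1, 2, 2, 4, 4, 5, 5] (PySem.Int.mod i 10) 0 then 1 else 0)))
    _ (by intro acc x hx; rw [hmod x hx])]
  have hrange : PySem.List.pyRange 0 (answers.length : Int) 1
      = (PySem.List.enumerate answers).map (fun x => x.1) := by
    rw [PySem.List.map_fst_enumerate]; norm_num
  rw [hrange, List.foldl_map]
  rw [PySem.List.foldl_congr_mem _ _
    (fun (s : Int × Int × Int) (ia : Int × Int) =>
        (s.1 + (if ia.2
                  = PySem.List.pyGetD [(1:Int), 2, 3, 4, 5] (PySem.Int.mod ia.1 5) 0 then 1 else 0),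
         s.2.1 + (if ia.2
                  = PySem.List.pyGetD [(2:Int), 1, 2, 3, 2, 4, 2, 5] (PySem.Int.mod ia.1 8) 0 then 1 else 0),
         s.2.2 + (if ia.2
                  = PySem.List.pyGetD [(3:Int), 3, 1, 1, 2, 2, 4, 4, 5, 5] (PySem.Int.mod ia.1 10) 0 then 1 else 0)))
    _ (by
        intro acc x hx
        obtain ⟨_, hget⟩ := pv_enum_getD answers 0 x.1 x.2 (by simpa using hx)
        simp only [sub_zero] at hget
        rw [hget])]
  have h123 : (List.foldl
      (fun (s : Int × Int × Int) (ia : Int × Int) =>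
        (s.1 + (if ia.2 = PySem.List.pyGetD [(1:Int), 2, 3, 4, 5] (PySem.Int.mod ia.1 5) 0 then 1 else 0),
         s.2.1 + (if ia.2 = PySem.List.pyGetD [(2:Int), 1, 2, 3, 2, 4, 2, 5] (PySem.Int.mod ia.1 8) 0 then 1 else 0),
         s.2.2 + (if ia.2 = PySem.List.pyGetD [(3:Int), 3, 1, 1, 2, 2, 4, 4, 5, 5] (PySem.Int.mod ia.1 10) 0 then 1 else 0)))
      ((0:Int), (0:Int), (0:Int)) (PySem.List.enumerate answers))
    = (List.foldl (fun (t : Int) (ia : Int × Int) =>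
         t + (if ia.2 = PySem.List.pyGetD [(1:Int), 2, 3, 4, 5] (PySem.Int.mod ia.1 5) 0 then 1 else 0))
         0 (PySem.List.enumerate answers),
       List.foldl (fun (t : Int × Int) (ia : Int × Int) =>
         (t.1 + (if ia.2 = PySem.List.pyGetD [(2:Int), 1, 2, 3, 2, 4, 2, 5] (PySem.Int.mod ia.1 8) 0 then 1 else 0),
          t.2 + (if ia.2 = PySem.List.pyGetD [(3:Int), 3, 1, 1, 2, 2, 4, 4, 5, 5] (PySem.Int.mod ia.1 10) 0 then 1 else 0)))
         ((0:Int), (0:Int)) (PySem.List.enumerate answers)) :=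
    PySem.List.foldl_prod_mk
      (fun (t : Int) (ia : Int × Int) =>
         t + (if ia.2 = PySem.List.pyGetD [(1:Int), 2, 3, 4, 5] (PySem.Int.mod ia.1 5) 0 then 1 else 0))
      (fun (t : Int × Int) (ia : Int × Int) =>
         (t.1 + (if ia.2 = PySem.List.pyGetD [(2:Int), 1, 2, 3, 2, 4, 2, 5] (PySem.Int.mod ia.1 8) 0 then 1 else 0),
          t.2 + (if ia.2 = PySem.List.pyGetD [(3:Int), 3, 1, 1, 2, 2, 4, 4, 5, 5] (PySem.Int.mod ia.1 10) 0 then 1 else 0)))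
      (PySem.List.enumerate answers) 0 ((0:Int), (0:Int))
  have h23 : (List.foldl (fun (t : Int × Int) (ia : Int × Int) =>
         (t.1 + (if ia.2 = PySem.List.pyGetD [(2:Int), 1, 2, 3, 2, 4, 2, 5] (PySem.Int.mod ia.1 8) 0 then 1 else 0),
          t.2 + (if ia.2 = PySem.List.pyGetD [(3:Int), 3, 1, 1, 2, 2, 4, 4, 5, 5] (PySem.Int.mod ia.1 10) 0 then 1 else 0)))
         ((0:Int), (0:Int)) (PySem.List.enumerate answers))
    = (List.foldl (fun (t : Int) (ia : Int × Int) =>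
         t + (if ia.2 = PySem.List.pyGetD [(2:Int), 1, 2, 3, 2, 4, 2, 5] (PySem.Int.mod ia.1 8) 0 then 1 else 0))
         0 (PySem.List.enumerate answers),
       List.foldl (fun (t : Int) (ia : Int × Int) =>
         t + (if ia.2 = PySem.List.pyGetD [(3:Int), 3, 1, 1, 2, 2, 4, 4, 5, 5] (PySem.Int.mod ia.1 10) 0 then 1 else 0))
         0 (PySem.List.enumerate answers)) :=
    PySem.List.foldl_prod_mk
      (fun (t : Int) (ia : Int × Int) =>
         t + (if ia.2 = PySem.List.pyGetD [(2:Int), 1, 2, 3, 2, 4, 2, 5] (PySem.Int.mod ia.1 8) 0 then 1 else 0))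
      (fun (t : Int) (ia : Int × Int) =>
         t + (if ia.2 = PySem.List.pyGetD [(3:Int), 3, 1, 1, 2, 2, 4, 4, 5, 5] (PySem.Int.mod ia.1 10) 0 then 1 else 0))
      (PySem.List.enumerate answers) 0 0
  rw [h123, h23]
  rw [pv_comp_gen answers [1, 2, 3, 4, 5] 5 (by norm_num),
      pv_comp_gen answers [2, 1, 2, 3, 2, 4, 2, 5] 8 (by norm_num),
      pv_comp_gen answers [3, 3, 1, 1, 2, 2, 4, 4, 5, 5] 10 (by norm_num)]

-- the bucket dict reads back as a count over the key list
theorem pv_bucket_getD (answers : List Int) (k : Int × Int) :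
    (pvBucket answers).getD k 0
      = (((PySem.List.enumerate answers).map (fun ia => (PySem.Int.mod ia.1 40, ia.2))).count k : Int) := by
  unfold pvBucket
  rw [show (PySem.List.enumerate answers).foldl
        (fun (d : PySem.Dict (Int × Int) Int) ia =>
          d.insert (PySem.Int.mod ia.1 40, ia.2) (d.getD (PySem.Int.mod ia.1 40, ia.2) 0 + 1))
        PySem.Dict.empty
      = ((PySem.List.enumerate answers).map (fun ia => (PySem.Int.mod ia.1 40, ia.2))).foldl
        (fun (d : PySem.Dict (Int × Int) Int) x => d.insert x (d.getD x 0 + 1))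
        PySem.Dict.empty from by rw [List.foldl_map]]
  rw [PySem.Dict.getD_foldl_insert_add_one]
  simp [PySem.Dict.getD_empty]

-- one in-range key is counted once in enumerate t iff its value matches the table
theorem pv_enum_count (t : List Int) (k : Int × Int) (h0 : 0 ≤ k.1) (h1 : k.1 < (t.length : Int)) :
    ((PySem.List.enumerate t).count k : Int)
      = (if k.2 = PySem.List.pyGetD t k.1 0 then (1 : Int) else 0) := by
  have hnd : (PySem.List.enumerate t).Nodup :=
    (PySem.List.pairwise_lt_enumerate t 0).imp (fun h => by
      intro he; rw [he] at h; exact lt_irrefl _ h)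
  by_cases hc : k.2 = PySem.List.pyGetD t k.1 0
  · have hlt : k.1.toNat < t.length := by omega
    have hget : PySem.List.pyGetD t k.1 0 = t[k.1.toNat] := by
      rw [PySem.List.pyGetD_of_nonneg _ _ h0]
      simp [List.getD_eq_getElem?_getD, List.getElem?_eq_getElem hlt]
    have hmem : k ∈ PySem.List.enumerate t := by
      rw [PySem.List.mem_enumerate_iff]
      exact ⟨k.1.toNat, hlt, by
        rw [Prod.ext_iff]
        constructor
        · simp; omega
        · simp [hc, hget]⟩
    rw [List.count_eq_one_of_mem hnd hmem]
    simp [hc]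
  · have hnm : k ∉ PySem.List.enumerate t := by
      intro hmem
      obtain ⟨_, hget⟩ := pv_enum_getD t 0 k.1 k.2 (by simpa using hmem)
      simp only [sub_zero] at hget
      exact hc hget.symm
    rw [List.count_eq_zero.mpr hnm]
    simp [hc]

-- sum of a pointwise sum splits
theorem pv_sum_split (l : List (Int × Int)) (f g : Int × Int → Int) :
    (l.map (fun e => f e + g e)).sum = (l.map f).sum + (l.map g).sum := by
  induction l with
  | nil => simp
  | cons x xs ih => simp [ih]; ring

-- a 0/1 indicator sum is a count
theorem pv_sum_indicator (l : List (Int × Int)) (k : Int × Int) :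
    (l.map (fun e => if e = k then (1 : Int) else 0)).sum = (l.count k : Int) := by
  induction l with
  | nil => simp
  | cons x xs ih =>
    rw [List.map_cons, List.sum_cons, ih, List.count_cons]
    push_cast
    by_cases h : x = k
    · simp [h]
      try omega
    · simp [h, beq_iff_eq]
      try omega

-- summing counts of the distinct keys (r, t[r]) over enumerate t counts the matching keys
theorem pv_sum_count (t : List Int) :
    ∀ (keys : List (Int × Int)), (∀ k ∈ keys, 0 ≤ k.1 ∧ k.1 < (t.length : Int)) →
    ((PySem.List.enumerate t).map (fun e => (keys.count e : Int))).sum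
      = (keys.countP (fun k => decide (k.2 = PySem.List.pyGetD t k.1 0)) : Int) := by
  intro keys
  induction keys with
  | nil => intro _; simp
  | cons k ks ih =>
    intro hk
    obtain ⟨h0, h1⟩ := hk k (by simp)
    have hrec := ih (fun x hx => hk x (by simp [hx]))
    have hcnt : ∀ e : Int × Int, (((k :: ks).count e : Nat) : Int)
        = ((ks.count e : Nat) : Int) + (if e = k then (1 : Int) else 0) := by
      intro e
      rw [List.count_cons]
      push_cast
      by_cases h : e = k
      · simp [h]
        try omega
      · simp [h, Ne.symm h, beq_iff_eq]
        try omega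
    simp only [hcnt]
    rw [pv_sum_split, hrec, pv_sum_indicator, pv_enum_count t k h0 h1, List.countP_cons]
    push_cast
    by_cases hb : k.2 = PySem.List.pyGetD t k.1 0
    · simp [hb]
      try omega
    · simp [hb]
      try omega

-- B's table-lookup score equals the direct score (Lp the pattern length divides 40)
theorem pv_tableScore_eq (answers p : List Int)
    (hdvd : ∀ i : Int,
      PySem.List.pyGetD (PySem.List.pyRepeat p (PySem.Int.floordiv 40 (p.length : Int)))
        (PySem.Int.mod i 40) 0
      = PySem.List.pyGetD p (PySem.Int.mod i (p.length : Int)) 0)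
    (hlen : ((PySem.List.pyRepeat p (PySem.Int.floordiv 40 (p.length : Int))).length : Int) = 40) :
    pvTableScore (pvBucket answers) p = pvScore answers p := by
  unfold pvTableScore
  rw [PySem.List.foldl_add]
  simp only [pv_bucket_getD]
  rw [zero_add]
  rw [pv_sum_count _ _ (by
    intro k hk
    simp only [List.mem_map] at hk
    obtain ⟨ia, _, hia⟩ := hk
    subst hia
    rw [hlen]
    constructor
    · rw [PySem.Int.mod_eq_emod_of_pos (by norm_num)]
      exact Int.emod_nonneg _ (by norm_num)
    · rw [PySem.Int.mod_eq_emod_of_pos (by norm_num)]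
      exact Int.emod_lt_of_pos _ (by norm_num))]
  rw [List.countP_map]
  unfold pvScore
  congr 1
  apply List.countP_congr
  intro ia _
  simp only [Function.comp_apply]
  rw [hdvd ia.1]

-- the tiled table agrees with the pattern under mod 40, given the 40-entry table check
theorem pv_mod_tbl (p : List Int) (hL : 0 < (p.length : Int)) (hd : ((p.length : Nat) : Int) ∣ 40)
    (htab : ∀ rn ∈ List.range 40,
      PySem.List.pyGetD (PySem.List.pyRepeat p (PySem.Int.floordiv 40 (p.length : Int))) ((rn : Nat) : Int) 0
        = PySem.List.pyGetD p (PySem.Int.mod ((rn : Nat) : Int) (p.length : Int)) 0) :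
    ∀ i : Int,
      PySem.List.pyGetD (PySem.List.pyRepeat p (PySem.Int.floordiv 40 (p.length : Int)))
        (PySem.Int.mod i 40) 0
      = PySem.List.pyGetD p (PySem.Int.mod i (p.length : Int)) 0 := by
  intro i
  have h40 : (0 : Int) < 40 := by norm_num
  have hr0 : 0 ≤ PySem.Int.mod i 40 := by
    rw [PySem.Int.mod_eq_emod_of_pos h40]; exact Int.emod_nonneg i (by norm_num)
  have hr1 : PySem.Int.mod i 40 < 40 := by
    rw [PySem.Int.mod_eq_emod_of_pos h40]; exact Int.emod_lt_of_pos i h40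
  have hcast : ((PySem.Int.mod i 40).toNat : Int) = PySem.Int.mod i 40 := by omega
  have hmem : (PySem.Int.mod i 40).toNat ∈ List.range 40 := by
    rw [List.mem_range]; omega
  have hmm : PySem.Int.mod (PySem.Int.mod i 40) (p.length : Int) = PySem.Int.mod i (p.length : Int) := by
    rw [PySem.Int.mod_eq_emod_of_pos h40, PySem.Int.mod_eq_emod_of_pos hL, PySem.Int.mod_eq_emod_of_pos hL]
    exact Int.emod_emod_of_dvd i hd
  calc PySem.List.pyGetD (PySem.List.pyRepeat p (PySem.Int.floordiv 40 (p.length : Int)))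
        (PySem.Int.mod i 40) 0
      = PySem.List.pyGetD (PySem.List.pyRepeat p (PySem.Int.floordiv 40 (p.length : Int)))
        (((PySem.Int.mod i 40).toNat : Nat) : Int) 0 := by rw [hcast]
    _ = PySem.List.pyGetD p (PySem.Int.mod (((PySem.Int.mod i 40).toNat : Nat) : Int) (p.length : Int)) 0 :=
        htab _ hmem
    _ = PySem.List.pyGetD p (PySem.Int.mod i (p.length : Int)) 0 := by rw [hcast, hmm]

-- pyGetD on a 3-element literal list at literal indices
theorem pv_get3 (a b c : Int) :
    PySem.List.pyGetD [a, b, c] (0 : Int) 0 = a ∧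
    PySem.List.pyGetD [a, b, c] (1 : Int) 0 = b ∧
    PySem.List.pyGetD [a, b, c] (2 : Int) 0 = c := by
  refine ⟨?_, ?_, ?_⟩ <;> simp [PySem.List.pyGetD, PySem.List.pyGet?, PySem.List.pyIdx?]

-- sorting the assembled answer list is the identity (it is built in ascending order)
theorem pv_sort_id (c1 c2 c3 : Prop) [Decidable c1] [Decidable c2] [Decidable c3] :
    (if ((if c1 then [(1 : Int)] else []) ++ (if c2 then [(2 : Int)] else [])
          ++ (if c3 then [(3 : Int)] else [])).length > 1
     then PySem.List.sorted ((if c1 then [(1 : Int)] else []) ++ (if c2 then [(2 : Int)] else [])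
          ++ (if c3 then [(3 : Int)] else [])) (fun x => x)
     else (if c1 then [(1 : Int)] else []) ++ (if c2 then [(2 : Int)] else [])
          ++ (if c3 then [(3 : Int)] else []))
    = (if c1 then [(1 : Int)] else []) ++ (if c2 then [(2 : Int)] else [])
          ++ (if c3 then [(3 : Int)] else []) := by
  split_ifs <;> decide

-- Python max(a, b, c) agrees with B's max? over [a, b, c]
theorem pv_max_eq (a b c : Int) :
    (PySem.List.max? [a, b, c] (fun x => x)).getD 0 = max a (max b c) := by
  rw [max_def, max_def]
  by_cases h1 : a < b <;> by_cases h2 : b < c <;> by_cases h3 : a < c <;>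
    simp [PySem.List.max?, h1, h2, h3] <;> split_ifs <;> omega

-- ===== VERDICT (by name: the statement is the Claim_ definition above) =====
theorem solution_spec : Claim_equal_solution := by
  intro answers _
  unfold Spec_solution solution solution_alt
  simp only []
  rw [pv_fold_eq]
  rw [PySem.List.foldl_append_singleton_eq_map]
  simp only [List.map_cons, List.map_nil, List.nil_append]
  have e1 := pv_tableScore_eq answers [1, 2, 3, 4, 5]
        (pv_mod_tbl [1, 2, 3, 4, 5] (by norm_num) (by norm_num) (by decide)) (by decide)
  have e2 := pv_tableScore_eq answers [2, 1, 2, 3, 2, 4, 2, 5]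
        (pv_mod_tbl [2, 1, 2, 3, 2, 4, 2, 5] (by norm_num) (by norm_num) (by decide)) (by decide)
  have e3 := pv_tableScore_eq answers [3, 3, 1, 1, 2, 2, 4, 4, 5, 5]
        (pv_mod_tbl [3, 3, 1, 1, 2, 2, 4, 4, 5, 5] (by norm_num) (by norm_num) (by decide)) (by decide)
  simp only [e1, e2, e3, pv_max_eq]
  obtain ⟨g0, g1, g2⟩ := pv_get3 (pvScore answers [1, 2, 3, 4, 5])
    (pvScore answers [2, 1, 2, 3, 2, 4, 2, 5]) (pvScore answers [3, 3, 1, 1, 2, 2, 4, 4, 5, 5])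
  simp only [pv_sort_id, List.foldl_cons, List.foldl_nil, g0, g1, g2]
  split_ifs <;> simp
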